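-- pv_equiv track=rewrite | github.com/akshata29/aisearchmm | src/backend/retrieval/search_grounding.py | _order_document_types
-- ===== SOURCE A (Python) =====
-- from typing import List, Dict, TypedDict, Optional, Callable, Awaitable
--
-- def _order_document_types(doc_types: List[str]) -> List[str]:
--     """Ensure document types follow the preferred order: otq, nyp_columns, client_reviews, then others."""
--     priority_order = ["otq", "nyp_columns", "client_reviews"]
--     ordered_types = []
--
--     # Add priority types first if they exist in the list
--     for priority_type in priority_order:
--         if priority_type in doc_types:
--             ordered_types.append(priority_type)
--
--     # Add remaining types that are not in priority list
--     for doc_type in doc_types: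
--         if doc_type not in priority_order and doc_type not in ordered_types:
--             ordered_types.append(doc_type)
--
--     return ordered_types
-- ===== SOURCE B (Python) =====
-- def _order_document_types(doc_types):
--     """Ensure document types follow the preferred order: otq, nyp_columns, client_reviews, then others."""
--     priority_order = ["otq", "nyp_columns", "client_reviews"]
--     rank = {t: i for i, t in enumerate(priority_order)}
--     deduped = list(dict.fromkeys(doc_types))
--     return sorted(deduped, key=lambda t: rank.get(t, len(priority_order)))
-- ===== Notes on version B (the rewrite author's own statement) =====
-- stated objective: faster
-- what changed: Replaces A's accumulation loops, whose 'not in ordered_types' test rescans the growing output list, by the idiomatic dedup-then-stable-sort: dict.fromkeys for an O(n) hash dedup, then one stable sort keyed by a rank table (missing types rank last, so stability keeps first-appearance order).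
import Mathlib
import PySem

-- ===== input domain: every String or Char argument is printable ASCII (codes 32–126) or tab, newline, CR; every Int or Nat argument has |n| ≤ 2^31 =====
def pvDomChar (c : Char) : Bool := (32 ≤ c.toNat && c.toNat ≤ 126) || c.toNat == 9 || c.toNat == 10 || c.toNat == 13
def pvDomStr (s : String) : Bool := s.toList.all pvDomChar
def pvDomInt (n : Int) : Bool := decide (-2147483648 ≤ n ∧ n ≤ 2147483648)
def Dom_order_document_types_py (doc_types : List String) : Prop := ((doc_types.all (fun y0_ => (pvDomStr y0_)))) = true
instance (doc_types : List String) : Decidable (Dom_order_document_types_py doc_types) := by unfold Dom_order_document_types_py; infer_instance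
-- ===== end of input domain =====

-- B replaces A's two membership-scanning accumulation loops by the idiomatic dedup-then-stable-sort with a rank key; return values proved equal on all inputs.

-- ===== PORT A =====
def order_document_types_py (doc_types : List String) : List String :=
  let priority_order : List String := ["otq", "nyp_columns", "client_reviews"]
  let ordered_types : List String :=
    priority_order.foldl
      (fun acc priority_type =>
        if doc_types.contains priority_type then acc ++ [priority_type] else acc) []
  doc_types.foldl
    (fun acc doc_type =>
      if !priority_order.contains doc_type && !acc.contains doc_type
      then acc ++ [doc_type] else acc) ordered_types

-- ===== PORT B =====
def order_document_types_py_alt (doc_types : List String) : List String :=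
  let priority_order : List String := ["otq", "nyp_columns", "client_reviews"]
  let rank : PySem.Dict String Int :=
    (PySem.List.enumerate priority_order 0).foldl
      (fun d it => d.insert it.2 it.1) PySem.Dict.empty
  let deduped : List String := PySem.List.dedup doc_types
  PySem.List.sorted deduped (fun t => rank.getD t (PySem.List.len priority_order)) false

-- ===== PRECONDITION & SPEC =====
def Spec_order_document_types_py (doc_types : List String) (out : List String) : Prop := out = order_document_types_py_alt doc_types
instance (doc_types : List String) (out : List String) : Decidable (Spec_order_document_types_py doc_types out) := by unfold Spec_order_document_types_py; infer_instance

-- ===== CLAIM (what is proved, stated in full; the proofs are below) =====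
def Claim_equal_order_document_types_py : Prop := ∀ (doc_types : List String), Dom_order_document_types_py doc_types → Spec_order_document_types_py doc_types (order_document_types_py doc_types)

-- ===== LEMMAS AND PROOFS =====

-- the fixed priority list and B's rank key as a plain if-chain
abbrev pvPrio : List String := ["otq", "nyp_columns", "client_reviews"]

def pvRk (t : String) : Int :=
  if t = "client_reviews" then 2 else if t = "nyp_columns" then 1 else if t = "otq" then 0 else 3

theorem pvRk_cases (t : String) : pvRk t = 0 ∨ pvRk t = 1 ∨ pvRk t = 2 ∨ pvRk t = 3 := by
  unfold pvRk; split_ifs <;> simp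

-- B's key function is pvRk
theorem alt_eq_sorted (xs : List String) :
    order_document_types_py_alt xs = PySem.List.sorted (PySem.List.dedup xs) pvRk false := by
  rw [show order_document_types_py_alt xs = PySem.List.sorted (PySem.List.dedup xs)
      (fun t => PySem.Dict.getD
        ((((PySem.Dict.empty : PySem.Dict String Int).insert "otq" 0).insert "nyp_columns"
          1).insert "client_reviews" 2) t 3) false from rfl]
  congr 1
  funext t
  simp only [PySem.Dict.getD_insert, PySem.Dict.getD_empty]
  unfold pvRk
  split_ifs <;> rfl

-- insertBy walks past a prefix it does not go before
theorem insertBy_skip {α : Type} (before : α → α → Bool) (x : α) (P S : List α)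
    (hP : ∀ y ∈ P, before x y = false) :
    PySem.List.insertBy before x (P ++ S) = P ++ PySem.List.insertBy before x S := by
  induction P with
  | nil => simp
  | cons p P ih =>
    simp only [List.cons_append, PySem.List.insertBy, hP p (by simp)]
    simp only [Bool.false_eq_true, if_false, List.cons.injEq, true_and]
    exact ih (fun y hy => hP y (by simp [hy]))

-- insertBy stops in front of a suffix it goes before everywhere
theorem insertBy_front {α : Type} (before : α → α → Bool) (x : α) (S : List α)
    (hS : ∀ y ∈ S, before x y = true) :
    PySem.List.insertBy before x S = x :: S := by
  cases S with
  | nil => rfl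
  | cons y ys => simp [PySem.List.insertBy, hS y (by simp)]

-- insertion point of x: after everything not-before, in front of everything before
theorem insertBy_between {α : Type} (before : α → α → Bool) (x : α) (P S : List α)
    (hP : ∀ y ∈ P, before x y = false) (hS : ∀ y ∈ S, before x y = true) :
    PySem.List.insertBy before x (P ++ S) = P ++ x :: S := by
  rw [insertBy_skip before x P S hP, insertBy_front before x S hS]

-- stability: the stable sort by pvRk is the concatenation of the four rank classes
theorem sorted_rk_partition (xs : List String) :
    PySem.List.sorted xs pvRk false =
      xs.filter (fun t => pvRk t == 0) ++ xs.filter (fun t => pvRk t == 1) ++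
      xs.filter (fun t => pvRk t == 2) ++ xs.filter (fun t => pvRk t == 3) := by
  induction xs using List.reverseRecOn with
  | nil => rfl
  | append_singleton ys x ih =>
    rw [PySem.List.sorted_eq_foldl_insertBy, List.foldl_append,
      ← PySem.List.sorted_eq_foldl_insertBy, ih]
    simp only [List.foldl_cons, List.foldl_nil]
    have hfilt : ∀ (k : Int) (y : String), y ∈ ys.filter (fun t => pvRk t == k) → pvRk y = k := by
      intro k y hy
      have := (List.mem_filter.mp hy).2
      simpa using this
    rcases pvRk_cases x with h | h | h | h
    · rw [List.append_assoc, List.append_assoc,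
        insertBy_between _ x _ _
          (by intro y hy; simp [h, hfilt 0 y hy])
          (by
            intro y hy
            rcases List.mem_append.mp hy with hy | hy
            · simp [h, hfilt 1 y hy]
            · rcases List.mem_append.mp hy with hy | hy
              · simp [h, hfilt 2 y hy]
              · simp [h, hfilt 3 y hy])]
      simp [List.filter_append, h, List.append_assoc]
    · rw [List.append_assoc,
        insertBy_between _ x _ _
          (by
            intro y hy
            rcases List.mem_append.mp hy with hy | hy
            · simp [h, hfilt 0 y hy]
            · simp [h, hfilt 1 y hy])
          (by
            intro y hy
            rcases List.mem_append.mp hy with hy | hy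
            · simp [h, hfilt 2 y hy]
            · simp [h, hfilt 3 y hy])]
      simp [List.filter_append, h, List.append_assoc]
    · rw [insertBy_between _ x _ _
          (by
            intro y hy
            rcases List.mem_append.mp hy with hy | hy
            · rcases List.mem_append.mp hy with hy | hy
              · simp [h, hfilt 0 y hy]
              · simp [h, hfilt 1 y hy]
            · simp [h, hfilt 2 y hy])
          (by intro y hy; simp [h, hfilt 3 y hy])]
      simp [List.filter_append, h, List.append_assoc]
    · rw [PySem.List.insertBy_of_forall_not_before _ x _ (by
        intro y hy
        rcases List.mem_append.mp hy with hy | hy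
        · rcases List.mem_append.mp hy with hy | hy
          · rcases List.mem_append.mp hy with hy | hy
            · simp [h, hfilt 0 y hy]
            · simp [h, hfilt 1 y hy]
          · simp [h, hfilt 2 y hy]
        · simp [h, hfilt 3 y hy])]
      simp [List.filter_append, h, List.append_assoc]

-- filtering a duplicate-free list for one element
theorem filter_eq_of_nodup (l : List String) (a : String) (h : l.Nodup) :
    l.filter (fun t => t == a) = if a ∈ l then [a] else [] := by
  induction l with
  | nil => simp
  | cons x xs ih =>
    have hx : x ∉ xs := (List.nodup_cons.mp h).1
    have ih' := ih (List.nodup_cons.mp h).2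
    by_cases hxa : x = a
    · subst hxa
      simp [ih', hx]
    · simp [hxa, ih', Ne.symm hxa]

-- filter commutes with the accumulate-if-absent loop
theorem filter_foldl_add (p : String → Bool) (xs : List String) :
    ∀ acc : List String,
      (xs.foldl PySem.Set.add acc).filter p = (xs.filter p).foldl PySem.Set.add (acc.filter p) := by
  induction xs with
  | nil => intro acc; simp
  | cons x xs ih =>
    intro acc
    by_cases hm : x ∈ acc
    · have : PySem.Set.add acc x = acc := by simp [PySem.Set.add, hm]
      by_cases hp : p x
      · simp only [List.foldl_cons, this, List.filter_cons, hp]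
        rw [ih]
        have : PySem.Set.add (acc.filter p) x = acc.filter p := by
          simp [PySem.Set.add, List.mem_filter, hm, hp]
        simp [this]
      · simp [List.foldl_cons, this, hp, ih]
    · have hadd : PySem.Set.add acc x = acc ++ [x] := by simp [PySem.Set.add, hm]
      by_cases hp : p x
      · simp only [List.foldl_cons, hadd, List.filter_cons, hp]
        rw [ih]
        have h1 : (acc ++ [x]).filter p = acc.filter p ++ [x] := by simp [List.filter_append, hp]
        have h2 : PySem.Set.add (acc.filter p) x = acc.filter p ++ [x] := by
          simp [PySem.Set.add, List.mem_filter, hm]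
        simp [h1, h2]
      · simp only [List.foldl_cons, hadd, List.filter_cons, hp]
        rw [ih]
        have h1 : (acc ++ [x]).filter p = acc.filter p := by simp [List.filter_append, hp]
        simp [h1]

-- A's second loop factors through the priority prefix it starts from
theorem a_loop_split (xs : List String) :
    ∀ (ord r : List String), (∀ y ∈ ord, y ∈ pvPrio) →
      xs.foldl (fun acc t => if !pvPrio.contains t && !acc.contains t then acc ++ [t] else acc) (ord ++ r)
      = ord ++ xs.foldl (fun acc t => if !pvPrio.contains t && !acc.contains t then acc ++ [t] else acc) r := by
  induction xs with
  | nil => intro ord r _; simp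
  | cons x xs ih =>
    intro ord r hord
    simp only [List.foldl_cons]
    by_cases hp : x ∈ pvPrio
    · rw [show (if (!pvPrio.contains x && !(ord ++ r).contains x) = true
            then (ord ++ r) ++ [x] else ord ++ r) = ord ++ r from by simp [hp],
          show (if (!pvPrio.contains x && !r.contains x) = true
            then r ++ [x] else r) = r from by simp [hp]]
      exact ih ord r hord
    · have hxo : x ∉ ord := fun hx => hp (hord x hx)
      by_cases hr : x ∈ r
      · rw [show (if (!pvPrio.contains x && !(ord ++ r).contains x) = true
              then (ord ++ r) ++ [x] else ord ++ r) = ord ++ r from by simp [hp, hr],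
            show (if (!pvPrio.contains x && !r.contains x) = true
              then r ++ [x] else r) = r from by simp [hp, hr]]
        exact ih ord r hord
      · rw [show (if (!pvPrio.contains x && !(ord ++ r).contains x) = true
              then (ord ++ r) ++ [x] else ord ++ r) = ord ++ (r ++ [x]) from by
            simp [hp, hxo, hr],
            show (if (!pvPrio.contains x && !r.contains x) = true
              then r ++ [x] else r) = r ++ [x] from by simp [hp, hr]]
        exact ih ord (r ++ [x]) hord

-- A's second loop, started empty, is the dedup of the non-priority elements
theorem a_loop_dedup (xs : List String) :
    ∀ r : List String,
      xs.foldl (fun acc t => if !pvPrio.contains t && !acc.contains t then acc ++ [t] else acc) r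
      = (xs.filter (fun t => !pvPrio.contains t)).foldl PySem.Set.add r := by
  induction xs with
  | nil => intro r; rfl
  | cons x xs ih =>
    intro r
    simp only [List.foldl_cons, List.filter_cons]
    by_cases hp : x ∈ pvPrio
    · rw [show (if (!pvPrio.contains x && !r.contains x) = true
            then r ++ [x] else r) = r from by simp [hp],
          show (!pvPrio.contains x) = false from by simp [hp]]
      simp only [Bool.false_eq_true, if_false]
      exact ih r
    · by_cases hr : x ∈ r
      · rw [show (if (!pvPrio.contains x && !r.contains x) = true
              then r ++ [x] else r) = r from by simp [hp, hr],
            show (!pvPrio.contains x) = true from by simp [hp]]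
        simp only [if_true, List.foldl_cons]
        rw [show PySem.Set.add r x = r from by simp [PySem.Set.add, hr]]
        exact ih r
      · rw [show (if (!pvPrio.contains x && !r.contains x) = true
              then r ++ [x] else r) = r ++ [x] from by simp [hp, hr],
            show (!pvPrio.contains x) = true from by simp [hp]]
        simp only [if_true, List.foldl_cons]
        rw [show PySem.Set.add r x = r ++ [x] from by simp [PySem.Set.add, hr]]
        exact ih (r ++ [x])

-- main equality
theorem a_eq_alt (xs : List String) : order_document_types_py xs = order_document_types_py_alt xs := by
  have hord : (∀ y ∈ (if xs.contains "otq" then ["otq"] else ([] : List String)) ++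
      ((if xs.contains "nyp_columns" then ["nyp_columns"] else []) ++
       (if xs.contains "client_reviews" then ["client_reviews"] else [])), y ∈ pvPrio) := by
    intro y hy
    have : y = "otq" ∨ y = "nyp_columns" ∨ y = "client_reviews" := by
      split_ifs at hy <;> simp at hy <;> tauto
    rcases this with h | h | h <;> simp [pvPrio, h]
  have hA : order_document_types_py xs =
      ((if xs.contains "otq" then ["otq"] else []) ++
       ((if xs.contains "nyp_columns" then ["nyp_columns"] else []) ++
        (if xs.contains "client_reviews" then ["client_reviews"] else []))) ++
      PySem.List.dedup (xs.filter (fun t => !pvPrio.contains t)) := by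
    unfold order_document_types_py
    simp only [List.foldl_cons, List.foldl_nil, List.nil_append]
    have hshape : (if xs.contains "client_reviews" = true then
        (if xs.contains "nyp_columns" = true then
          (if xs.contains "otq" = true then ["otq"] else []) ++ ["nyp_columns"]
         else (if xs.contains "otq" = true then ["otq"] else [])) ++ ["client_reviews"]
        else (if xs.contains "nyp_columns" = true then
          (if xs.contains "otq" = true then ["otq"] else []) ++ ["nyp_columns"]
         else (if xs.contains "otq" = true then ["otq"] else [])))
        = ((if xs.contains "otq" then ["otq"] else []) ++
           ((if xs.contains "nyp_columns" then ["nyp_columns"] else []) ++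
            (if xs.contains "client_reviews" then ["client_reviews"] else []))) ++ [] := by
      split_ifs <;> simp
    rw [hshape, a_loop_split xs _ _ (by
        intro y hy; exact hord y (by simpa using hy)), a_loop_dedup]
    rfl
  rw [hA, alt_eq_sorted, sorted_rk_partition]
  have hd := PySem.List.nodup_dedup xs
  have h0 : (PySem.List.dedup xs).filter (fun t => pvRk t == 0)
      = if "otq" ∈ xs then ["otq"] else [] := by
    rw [List.filter_congr (by
      intro t _
      show (pvRk t == 0) = (t == "otq")
      unfold pvRk; split_ifs <;> simp_all)]
    rw [filter_eq_of_nodup _ _ hd]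
    by_cases hm : "otq" ∈ xs <;> simp [hm]
  have h1 : (PySem.List.dedup xs).filter (fun t => pvRk t == 1)
      = if "nyp_columns" ∈ xs then ["nyp_columns"] else [] := by
    rw [List.filter_congr (by
      intro t _
      show (pvRk t == 1) = (t == "nyp_columns")
      unfold pvRk; split_ifs <;> simp_all)]
    rw [filter_eq_of_nodup _ _ hd]
    by_cases hm : "nyp_columns" ∈ xs <;> simp [hm]
  have h2 : (PySem.List.dedup xs).filter (fun t => pvRk t == 2)
      = if "client_reviews" ∈ xs then ["client_reviews"] else [] := by
    rw [List.filter_congr (by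
      intro t _
      show (pvRk t == 2) = (t == "client_reviews")
      unfold pvRk; split_ifs <;> simp_all)]
    rw [filter_eq_of_nodup _ _ hd]
    by_cases hm : "client_reviews" ∈ xs <;> simp [hm]
  have h3 : (PySem.List.dedup xs).filter (fun t => pvRk t == 3)
      = PySem.List.dedup (xs.filter (fun t => !pvPrio.contains t)) := by
    rw [List.filter_congr (by
      intro t _
      show (pvRk t == 3) = !pvPrio.contains t
      unfold pvRk pvPrio
      split_ifs <;> simp_all)]
    show (PySem.List.dedup xs).filter _ = PySem.Set.ofList _
    unfold PySem.List.dedup PySem.Set.ofList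
    rw [filter_foldl_add]
    rfl
  rw [h0, h1, h2, h3]
  simp [List.contains_eq_mem, List.append_assoc]

-- ===== VERDICT (by name: the statement is the Claim_ definition above) =====
theorem order_document_types_py_spec : Claim_equal_order_document_types_py := by
  intro doc_types _
  show _ = _
  exact a_eq_alt doc_types
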